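-- pv_equiv track=rewrite | github.com/OsisZool/OODs | ex3.py | group_of_no_1
-- ===== SOURCE A (Python) =====
-- def group_of_no_1(island_list, point_no):
--     if point_no < 1 or point_no > len(island_list) or island_list[point_no - 1] == 0:
--         return 0
--     res = 1
--     island_list[point_no - 1] = 0
--     res += group_of_no_1(island_list, point_no - 1)
--     res += group_of_no_1(island_list, point_no + 1)
--     return res
-- ===== SOURCE B (Python) =====
-- def group_of_no_1(island_list, point_no):
--     if point_no < 1 or point_no > len(island_list) or island_list[point_no - 1] == 0:
--         return 0
--     i = point_no - 1
--     while i > 0 and island_list[i - 1] != 0: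
--         i -= 1
--     j = point_no - 1
--     while j + 1 < len(island_list) and island_list[j + 1] != 0:
--         j += 1
--     return j - i + 1
-- ===== Notes on version B (the rewrite author's own statement) =====
-- stated objective: alternative
-- what changed: A's two-sided recursion, which zeroes the list in place as it counts, is replaced by two iterative index scans (left and right of the start position) over the untouched list; B has no recursion and no mutation.
import Mathlib
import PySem

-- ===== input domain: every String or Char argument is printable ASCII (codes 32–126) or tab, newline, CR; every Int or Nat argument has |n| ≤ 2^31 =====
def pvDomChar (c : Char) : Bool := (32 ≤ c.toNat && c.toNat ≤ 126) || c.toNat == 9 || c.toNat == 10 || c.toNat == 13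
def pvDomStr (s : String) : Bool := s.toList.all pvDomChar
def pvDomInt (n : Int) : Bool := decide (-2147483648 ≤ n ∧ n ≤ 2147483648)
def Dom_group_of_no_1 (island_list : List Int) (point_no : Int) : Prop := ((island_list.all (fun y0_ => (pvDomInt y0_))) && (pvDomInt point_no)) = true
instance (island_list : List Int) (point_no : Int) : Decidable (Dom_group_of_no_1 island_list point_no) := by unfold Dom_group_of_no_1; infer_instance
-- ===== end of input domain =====

-- B replaces A's two-sided recursion (which zeroes the list as it counts) by two iterative index
-- scans, left and right of the start, without mutating the list; equivalence is about the RETURN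
-- value only — Python A zeroes the whole group in island_list in place, B leaves it untouched.

-- ===== PORT A =====
-- A's recursion threads the mutated list through the calls: coreA returns (count, updated list).
-- The fuel argument only makes the recursion structurally total; length + 2 always suffices
-- (the equivalence proof below never reaches the fuel-0 branch).
def coreA : Nat → List Int → Int → Int × List Int
  | 0, l, _ => (0, l)
  | f+1, l, p =>
    if p < 1 ∨ (l.length : Int) < p ∨ PySem.List.pyGetD l (p-1) 0 = 0 then (0, l)
    else
      let l1 := PySem.List.pySetD l (p-1) 0
      let r1 := coreA f l1 (p-1)
      let r2 := coreA f r1.2 (p+1)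
      (1 + r1.1 + r2.1, r2.2)

def group_of_no_1 (island_list : List Int) (point_no : Int) : Int :=
  (coreA (island_list.length + 2) island_list point_no).1

-- ===== PORT B =====
-- lstep: B's left while-loop  'while i > 0 and island_list[i-1] != 0: i -= 1'
def lstep (l : List Int) : Nat → Nat
  | 0 => 0
  | i+1 => if l.getD i 0 ≠ 0 then lstep l i else i+1

-- rstep: B's right while-loop  'while j+1 < len(island_list) and island_list[j+1] != 0: j += 1'
def rstep (l : List Int) (j : Nat) : Nat :=
  if j + 1 < l.length ∧ l.getD (j+1) 0 ≠ 0 then rstep l (j+1) else j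
termination_by l.length - j
decreasing_by omega

def group_of_no_1_alt (island_list : List Int) (point_no : Int) : Int :=
  if point_no < 1 ∨ (island_list.length : Int) < point_no ∨ PySem.List.pyGetD island_list (point_no - 1) 0 = 0 then 0
  else
    let i0 := (point_no - 1).toNat
    ((rstep island_list i0 : Int) - (lstep island_list i0 : Int)) + 1

-- ===== PRECONDITION & SPEC =====
def Spec_group_of_no_1 (island_list : List Int) (point_no : Int) (out : Int) : Prop := out = group_of_no_1_alt island_list point_no
instance (island_list : List Int) (point_no : Int) (out : Int) : Decidable (Spec_group_of_no_1 island_list point_no out) := by unfold Spec_group_of_no_1; infer_instance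

-- ===== CLAIM (what is proved, stated in full; the proofs are below) =====
def Claim_equal_group_of_no_1 : Prop := ∀ (island_list : List Int) (point_no : Int), Dom_group_of_no_1 island_list point_no → Spec_group_of_no_1 island_list point_no (group_of_no_1 island_list point_no)

-- ===== LEMMAS AND PROOFS =====

theorem getD_set_ne (l : List Int) (i m : Nat) (v : Int) (h : m ≠ i) :
    (l.set i v).getD m 0 = l.getD m 0 := by
  simp [List.getD_eq_getElem?_getD, List.getElem?_set_ne h.symm]

theorem getD_set_self (l : List Int) (i : Nat) (v : Int) (h : i < l.length) :
    (l.set i v).getD i 0 = v := by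
  simp [List.getD_eq_getElem?_getD, List.getElem?_set_self h]

-- lstep reads only indices strictly below its argument
theorem lstep_set_high (l : List Int) (v : Int) (i j : Nat) (h : j ≤ i) :
    lstep (l.set i v) j = lstep l j := by
  induction j with
  | zero => simp [lstep]
  | succ j ih =>
    simp only [lstep, getD_set_ne l i j v (by omega)]
    split <;> simp [ih (by omega)]

-- rstep reads only indices strictly above its argument (and the length)
theorem rstep_congr (k : Nat) (l l' : List Int) (j : Nat) (hk : l.length - j ≤ k)
    (hlen : l'.length = l.length) (h : ∀ m, j < m → l'.getD m 0 = l.getD m 0) :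
    rstep l' j = rstep l j := by
  induction k generalizing j with
  | zero =>
    conv_lhs => rw [rstep]
    conv_rhs => rw [rstep]
    rw [if_neg (by omega), if_neg (by omega)]
  | succ k ih =>
    conv_lhs => rw [rstep]
    conv_rhs => rw [rstep]
    rw [hlen, h (j+1) (by omega)]
    split
    · exact ih (j+1) (by omega) (fun m hm => h m (by omega))
    · rfl

-- left half of A's recursion: called at position i+1 when the cell right of i is zero (or the edge)
theorem coreA_left (i : Nat) : ∀ (f : Nat) (l : List Int), i + 2 ≤ f → i < l.length →
    l.getD i 0 ≠ 0 → (i + 1 = l.length ∨ l.getD (i+1) 0 = 0) →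
    ∃ l', coreA f l ((i : Int) + 1) = (((i : Int) - lstep l i) + 1, l')
      ∧ l'.length = l.length ∧ l'.getD i 0 = 0 ∧ ∀ m, i < m → l'.getD m 0 = l.getD m 0 := by
  induction i with
  | zero =>
    intro f l hf hlen h0 hnb
    obtain ⟨f, rfl⟩ : ∃ f', f = f'+2 := ⟨f-2, by omega⟩
    refine ⟨l.set 0 0, ?_, by simp, getD_set_self l 0 0 (by omega),
      fun m hm => getD_set_ne l 0 m 0 (by omega)⟩
    rw [coreA]
    simp only [add_sub_cancel_right, PySem.List.pyGetD_natCast, PySem.List.pySetD_natCast]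
    rw [if_neg (by push_cast; rintro (h|h|h) <;> omega)]
    have e1 : coreA (f+1) (l.set 0 0) ((0:Nat):Int) = (0, l.set 0 0) := by
      rw [coreA, if_pos (by norm_num)]
    have e2 : coreA (f+1) (l.set 0 0) (((0:Nat):Int)+1+1) = (0, l.set 0 0) := by
      rw [coreA, if_pos]
      rcases hnb with h | h
      · right; left; rw [List.length_set, ← h]; push_cast
      · right; right
        have e : (((0:Nat):Int)+1+1-1) = ((1:Nat):Int) := by push_cast
        rw [e, PySem.List.pyGetD_natCast, getD_set_ne l 0 1 0 (by omega)]
        exact h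
    rw [e1, e2]
    simp [lstep]
  | succ i ih =>
    intro f l hf hlen h0 hnb
    obtain ⟨f, rfl⟩ : ∃ f', f = f'+2 := ⟨f-2, by omega⟩
    rw [coreA]
    simp only [add_sub_cancel_right, PySem.List.pyGetD_natCast, PySem.List.pySetD_natCast]
    rw [if_neg (by push_cast; rintro (h|h|h) <;> omega)]
    have ei : ((i+1:Nat):Int) - 1 = ((i:Nat):Int) := by push_cast; ring
    by_cases h2 : l.getD i 0 = 0
    · -- the cell left of the start is already 0: the left call stops immediately
      have e1 : coreA (f+1) (l.set (i+1) 0) ((i+1:Nat):Int) = (0, l.set (i+1) 0) := by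
        rw [coreA, if_pos]
        right; right
        rw [ei, PySem.List.pyGetD_natCast, getD_set_ne l (i+1) i 0 (by omega)]
        exact h2
      rw [e1]
      have e2 : coreA (f+1) (l.set (i+1) 0) (((i+1:Nat):Int)+1+1) = (0, l.set (i+1) 0) := by
        rw [coreA, if_pos]
        rcases hnb with h | h
        · right; left; rw [List.length_set, ← h]; push_cast; omega
        · right; right
          have e : (((i+1:Nat):Int)+1+1-1) = ((i+1+1:Nat):Int) := by push_cast; ring
          rw [e, PySem.List.pyGetD_natCast, getD_set_ne l (i+1) (i+1+1) 0 (by omega)]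
          exact h
      rw [e2]
      refine ⟨l.set (i+1) 0, ?_, by simp, getD_set_self l (i+1) 0 hlen,
        fun m hm => getD_set_ne l (i+1) m 0 (by omega)⟩
      simp only [Prod.mk.injEq, and_true]
      have hl : lstep l (i+1) = i+1 := by
        simp only [lstep]; rw [if_neg (by simp only [ne_eq, not_not]; exact h2)]
      rw [hl]
      push_cast; ring
    · -- the left call continues: apply the induction hypothesis on the zeroed list
      obtain ⟨l2, he, hlen2, hzero2, hagree2⟩ :=
        ih (f+1) (l.set (i+1) 0) (by omega) (by simp; omega)
          (by rw [getD_set_ne l (i+1) i 0 (by omega)]; exact h2)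
          (Or.inr (getD_set_self l (i+1) 0 hlen))
      have hcast : ((i+1:Nat):Int) = ((i:Nat):Int)+1 := Nat.cast_succ i
      rw [hcast, he]
      have e2 : coreA (f+1) l2 ((((i:Nat):Int)+1)+1+1) = (0, l2) := by
        rw [coreA, if_pos]
        rcases hnb with h | h
        · right; left
          rw [hlen2, List.length_set, ← h]; push_cast; omega
        · right; right
          have e : ((((i:Nat):Int)+1)+1+1-1) = ((i+1+1:Nat):Int) := by push_cast; ring
          rw [e, PySem.List.pyGetD_natCast, hagree2 (i+1+1) (by omega),
            getD_set_ne l (i+1) (i+1+1) 0 (by omega)]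
          exact h
      rw [e2]
      refine ⟨l2, ?_, by rw [hlen2]; simp, ?_, ?_⟩
      · simp only [Prod.mk.injEq, and_true]
        have hs : lstep (l.set (i+1) 0) i = lstep l i := lstep_set_high l 0 (i+1) i (by omega)
        have hl : lstep l (i+1) = lstep l i := by
          simp only [lstep]; rw [if_pos h2]
        rw [hs, hl]
        ring
      · rw [hagree2 (i+1) (by omega)]
        exact getD_set_self l (i+1) 0 hlen
      · intro m hm
        rw [hagree2 m (by omega)]
        exact getD_set_ne l (i+1) m 0 (by omega)

-- right half of A's recursion: called at position j+1 when the cell left of j is zero (or j = 0)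
theorem coreA_right (f : Nat) : ∀ (l : List Int) (j : Nat), l.length - j + 1 ≤ f →
    (j = 0 ∨ l.getD (j-1) 0 = 0) →
    (coreA f l ((j : Int) + 1)).1 =
      if j < l.length ∧ l.getD j 0 ≠ 0 then ((rstep l j : Int) - (j : Int)) + 1 else 0 := by
  induction f with
  | zero => intro l j hf _; omega
  | succ f ihf =>
    intro l j hf hnb
    by_cases hj : j < l.length
    · by_cases hz : l.getD j 0 = 0
      · -- start cell is zero: A's guard fails, B's right scan never starts
        rw [coreA]
        simp only [add_sub_cancel_right, PySem.List.pyGetD_natCast, PySem.List.pySetD_natCast]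
        rw [if_pos (Or.inr (Or.inr hz)), if_neg (by rintro ⟨-, h⟩; exact h hz)]
      · obtain ⟨f, rfl⟩ : ∃ f2, f = f2+1 := ⟨f-1, by omega⟩
        rw [coreA]
        simp only [add_sub_cancel_right, PySem.List.pyGetD_natCast, PySem.List.pySetD_natCast]
        rw [if_neg (by rintro (h|h|h) <;> omega)]
        have e1 : coreA (f+1) (l.set j 0) ((j:Nat):Int) = (0, l.set j 0) := by
          rw [coreA, if_pos]
          by_cases hj0 : j = 0
          · left; subst hj0; norm_num
          · right; right
            have e : ((j:Nat):Int) - 1 = ((j-1:Nat):Int) := by omega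
            rw [e, PySem.List.pyGetD_natCast, getD_set_ne l j (j-1) 0 (by omega)]
            rcases hnb with h | h
            · omega
            · exact h
        rw [e1]
        have ecast : ((j:Nat):Int) + 1 + 1 = ((j+1:Nat):Int) + 1 := by push_cast; ring
        rw [ecast]
        rw [ihf (l.set j 0) (j+1) (by rw [List.length_set]; omega)
          (Or.inr (by simpa using getD_set_self l j 0 hj))]
        have hgd : (l.set j 0).getD (j+1) 0 = l.getD (j+1) 0 := getD_set_ne l j (j+1) 0 (by omega)
        have hrs : rstep (l.set j 0) (j+1) = rstep l (j+1) :=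
          rstep_congr l.length l (l.set j 0) (j+1) (by omega) (by simp)
            (fun m hm => getD_set_ne l j m 0 (by omega))
        conv_rhs => rw [if_pos (And.intro hj hz), rstep]
        simp only [List.length_set, hgd, hrs]
        by_cases hc : j + 1 < l.length ∧ l.getD (j+1) 0 ≠ 0
        · rw [if_pos hc, if_pos hc]; push_cast; try ring
        · rw [if_neg hc, if_neg hc]; push_cast; try ring
    · -- j past the end: A's guard (point_no > len) fails the call
      rw [coreA]
      rw [if_pos (Or.inr (Or.inl (by omega)))]
      rw [if_neg (by rintro ⟨h, -⟩; omega)]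

-- the productive case: A's whole recursion vs B's two scans
theorem coreA_main (l : List Int) (i : Nat) (hi : i < l.length) (h0 : l.getD i 0 ≠ 0) :
    (coreA (l.length + 2) l ((i:Int)+1)).1 = ((rstep l i : Int) - (lstep l i : Int)) + 1 := by
  rw [show l.length+2 = (l.length+1)+1 from rfl, coreA]
  simp only [add_sub_cancel_right, PySem.List.pyGetD_natCast, PySem.List.pySetD_natCast]
  rw [if_neg (by rintro (h|h|h) <;> omega)]
  cases i with
  | zero =>
    have e1 : coreA (l.length+1) (l.set 0 0) ((0:Nat):Int) = (0, l.set 0 0) := by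
      rw [coreA, if_pos (by norm_num)]
    rw [e1]
    rw [show ((0:Nat):Int) + 1 + 1 = ((1:Nat):Int) + 1 from by norm_num]
    rw [coreA_right (l.length+1) (l.set 0 0) 1 (by rw [List.length_set]; omega)
      (Or.inr (by simpa using getD_set_self l 0 0 hi))]
    have hgd : (l.set 0 0).getD 1 0 = l.getD 1 0 := getD_set_ne l 0 1 0 (by omega)
    have hrs : rstep (l.set 0 0) 1 = rstep l 1 :=
      rstep_congr l.length l (l.set 0 0) 1 (by omega) (by simp)
        (fun m hm => getD_set_ne l 0 m 0 (by omega))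
    simp only [List.length_set, hgd, hrs]
    have hl0 : lstep l 0 = 0 := rfl
    conv_rhs => rw [rstep]
    rw [hl0]
    simp only [Nat.zero_add]
    by_cases hc : 1 < l.length ∧ l.getD 1 0 ≠ 0
    · rw [if_pos hc, if_pos hc]; push_cast; try ring
    · rw [if_neg hc, if_neg hc]; push_cast; try ring
  | succ i2 =>
    by_cases h2 : l.getD i2 0 = 0
    · -- left neighbour already zero: left call stops at once, B's left scan too
      have e1 : coreA (l.length+1) (l.set (i2+1) 0) ((i2+1:Nat):Int) = (0, l.set (i2+1) 0) := by
        rw [coreA, if_pos]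
        right; right
        rw [show ((i2+1:Nat):Int) - 1 = ((i2:Nat):Int) from by push_cast; ring,
          PySem.List.pyGetD_natCast, getD_set_ne l (i2+1) i2 0 (by omega)]
        exact h2
      rw [e1]
      rw [show ((i2+1:Nat):Int) + 1 + 1 = ((i2+1+1:Nat):Int) + 1 from by push_cast; ring]
      rw [coreA_right (l.length+1) (l.set (i2+1) 0) (i2+1+1) (by rw [List.length_set]; omega)
        (Or.inr (by simpa using getD_set_self l (i2+1) 0 hi))]
      have hgd : (l.set (i2+1) 0).getD (i2+1+1) 0 = l.getD (i2+1+1) 0 :=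
        getD_set_ne l (i2+1) (i2+1+1) 0 (by omega)
      have hrs : rstep (l.set (i2+1) 0) (i2+1+1) = rstep l (i2+1+1) :=
        rstep_congr l.length l (l.set (i2+1) 0) (i2+1+1) (by omega) (by simp)
          (fun m hm => getD_set_ne l (i2+1) m 0 (by omega))
      simp only [List.length_set, hgd, hrs]
      have hl : lstep l (i2+1) = i2+1 := by
        simp only [lstep]; rw [if_neg (by simp only [ne_eq, not_not]; exact h2)]
      conv_rhs => rw [rstep]
      rw [hl]
      by_cases hc : i2+1+1 < l.length ∧ l.getD (i2+1+1) 0 ≠ 0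
      · rw [if_pos hc, if_pos hc]; push_cast; try ring
      · rw [if_neg hc, if_neg hc]; push_cast; try ring
    · -- left run continues: coreA_left describes the whole left call
      obtain ⟨l2, he, hlen2, hzero2, hagree2⟩ :=
        coreA_left i2 (l.length+1) (l.set (i2+1) 0) (by omega) (by simp; omega)
          (by rw [getD_set_ne l (i2+1) i2 0 (by omega)]; exact h2)
          (Or.inr (getD_set_self l (i2+1) 0 hi))
      rw [show ((i2+1:Nat):Int) = ((i2:Nat):Int)+1 from Nat.cast_succ i2, he]
      rw [show ((i2:Nat):Int)+1+1+1 = ((i2+1+1:Nat):Int) + 1 from by push_cast; ring]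
      rw [coreA_right (l.length+1) l2 (i2+1+1) (by rw [hlen2, List.length_set]; omega)
        (Or.inr (by
          rw [show i2+1+1-1 = i2+1 from by omega, hagree2 (i2+1) (by omega)]
          exact getD_set_self l (i2+1) 0 hi))]
      have hgd : l2.getD (i2+1+1) 0 = l.getD (i2+1+1) 0 := by
        rw [hagree2 (i2+1+1) (by omega)]
        exact getD_set_ne l (i2+1) (i2+1+1) 0 (by omega)
      have hrs : rstep l2 (i2+1+1) = rstep l (i2+1+1) :=
        rstep_congr l.length l l2 (i2+1+1) (by omega) (by rw [hlen2]; simp)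
          (fun m hm => by
            rw [hagree2 m (by omega)]
            exact getD_set_ne l (i2+1) m 0 (by omega))
      simp only [hlen2, List.length_set, hgd, hrs]
      have hs : lstep (l.set (i2+1) 0) i2 = lstep l i2 := lstep_set_high l 0 (i2+1) i2 (by omega)
      have hl : lstep l (i2+1) = lstep l i2 := by
        simp only [lstep]; rw [if_pos h2]
      conv_rhs => rw [rstep]
      rw [hs, hl]
      by_cases hc : i2+1+1 < l.length ∧ l.getD (i2+1+1) 0 ≠ 0
      · rw [if_pos hc, if_pos hc]; push_cast; try ring
      · rw [if_neg hc, if_neg hc]; push_cast; try ring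

-- ===== VERDICT (by name: the statement is the Claim_ definition above) =====
theorem group_of_no_1_spec : Claim_equal_group_of_no_1 := by
  intro l p _
  unfold Spec_group_of_no_1 group_of_no_1 group_of_no_1_alt
  by_cases hg : p < 1 ∨ (l.length : Int) < p ∨ PySem.List.pyGetD l (p-1) 0 = 0
  · rw [if_pos hg, show l.length+2 = (l.length+1)+1 from rfl, coreA, if_pos hg]
  · rw [if_neg hg]
    push Not at hg
    obtain ⟨h1, h2, h3⟩ := hg
    have hpe : p - 1 = (((p-1).toNat : Nat) : Int) := by omega
    have hi : (p-1).toNat < l.length := by omega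
    have h3' : l.getD (p-1).toNat 0 ≠ 0 := by
      rwa [hpe, PySem.List.pyGetD_natCast] at h3
    have hp : p = (((p-1).toNat : Nat) : Int) + 1 := by omega
    conv_lhs => rw [hp]
    exact coreA_main l (p-1).toNat hi h3'
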